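-- pv_equiv track=rewrite | github.com/stilyantanev/Programming101-v3 | week1-Python-Problems/1-Warmups/next_hack.py | next_hack
-- ===== SOURCE A (Python) =====
-- def next_hack(n):
--     is_number_hack = False
--
--     while not is_number_hack:
--         n = n + 1
--
--         bin_number = str(bin(n)[2:])
--         reversed_bin_number = str(bin(n)[2:])[::-1]
--
--         sum_of_digits = {}
--         for digit in bin_number:
--             if digit not in sum_of_digits:
--                 sum_of_digits[digit] = 1
--             else:
--                 sum_of_digits[digit] += 1
--
--         if bin_number == reversed_bin_number and sum_of_digits["1"] % 2 == 1:
--             is_number_hack = True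
--
--     return n
-- ===== SOURCE B (Python) =====
-- # Direct construction: a "hack" number (binary palindrome with an odd number of
-- # ones) is exactly a binary palindrome of odd length with middle bit 1, i.e.
-- # pal(h) for odd h, where pal mirrors h's bits around its lowest bit.  Compute
-- # the half h directly from n's top bits: O(bits) instead of A's linear scan.
-- def next_hack(n):
--     if n < 1:
--         return 1
--     L = n.bit_length()
--     k = L // 2
--     if L % 2 == 0:
--         return _pal((1 << k) + 1)
--     h = n >> k
--     if h % 2 == 0:
--         h += 1
--     elif _pal(h) <= n:
--         h += 2
--     return _pal(h)
--
-- def _pal(h):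
--     # mirror h's binary digits around its lowest bit
--     v, t = h, h // 2
--     while t:
--         v = 2 * v + t % 2
--         t //= 2
--     return v
-- ===== Notes on version B (the rewrite author's own statement) =====
-- stated objective: faster
-- what changed: B constructs the answer directly: a 'hack' number is exactly a binary palindrome mirrored around a middle 1-bit, i.e. pal(h) for odd h, so B derives the half h from the top bits of n and returns pal(h) in O(bits), instead of A's scan that tests every integer above n with a string/dict palindrome check.
import Mathlib
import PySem

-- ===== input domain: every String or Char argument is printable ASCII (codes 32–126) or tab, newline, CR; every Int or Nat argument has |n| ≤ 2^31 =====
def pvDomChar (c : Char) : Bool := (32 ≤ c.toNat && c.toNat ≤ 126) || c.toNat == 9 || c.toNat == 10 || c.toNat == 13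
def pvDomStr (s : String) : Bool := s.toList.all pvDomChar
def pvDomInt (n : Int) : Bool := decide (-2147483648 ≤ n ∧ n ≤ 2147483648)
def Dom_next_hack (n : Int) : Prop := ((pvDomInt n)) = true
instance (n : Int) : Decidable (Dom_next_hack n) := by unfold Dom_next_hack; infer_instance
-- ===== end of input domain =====

-- B replaces A's linear scan by a direct O(bits) construction of the next
-- binary palindrome with odd popcount; proved equal to A on all n ≥ 0
-- (A raises KeyError on every n < 0, excluded by Pre_).

-- ===== PORT A =====

-- bin(m)[2:] digits of a positive int, MSB first (helper for pyBinTail)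
def pyBinNat (m : Nat) : List Char :=
  if h : m = 0 then []
  else pyBinNat (m / 2) ++ [if m % 2 = 1 then '1' else '0']
decreasing_by exact Nat.div_lt_self (Nat.pos_of_ne_zero h) one_lt_two

-- bin(i)[2:] as a char list (exact for every int: bin(-5)[2:] = "b101", bin(0)[2:] = "0")
def pyBinTail (i : Int) : List Char :=
  if i < 0 then 'b' :: pyBinNat (-i).toNat
  else if i = 0 then ['0']
  else pyBinNat i.toNat

-- the body of A's while-loop after n += 1: build the bin string, its reverse,
-- the digit-count dict, and test the hack condition
def checkA (i : Int) : Bool :=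
  let bn := pyBinTail i
  let rev := (PySem.List.slice? bn none none (-1)).getD []   -- s[::-1]
  let d := bn.foldl
    (fun d c => if d.contains c = false then d.insert c (1 : Int)
                else d.insert c (d.getD c 0 + 1))
    PySem.Dict.empty
  bn == rev && (d.getD '1' 0) % 2 == 1
  -- d["1"]: the key '1' exists whenever i ≥ 1 (always the case inside Pre_);
  -- Python raises KeyError otherwise, which Pre_ excludes

-- A's while-loop; fuel only makes the search total (proved never exhausted on Pre_)
def aloopA : Nat → Int → Int
  | 0, m => m + 1
  | fuel + 1, m =>
    let m' := m + 1
    if checkA m' then m' else aloopA fuel m'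

def next_hack (n : Int) : Int := aloopA (8 * n.toNat + 8) n

-- ===== PORT B =====

-- int.bit_length() for a nonnegative int
def bitLen (m : Nat) : Nat :=
  if h : m = 0 then 0
  else bitLen (m / 2) + 1
decreasing_by exact Nat.div_lt_self (Nat.pos_of_ne_zero h) one_lt_two

-- _pal's while-loop: v = 2*v + t % 2; t //= 2 while t ≠ 0
def palLoop (v t : Nat) : Nat :=
  if h : t = 0 then v
  else palLoop (2 * v + t % 2) (t / 2)
decreasing_by exact Nat.div_lt_self (Nat.pos_of_ne_zero h) one_lt_two

-- _pal(h): mirror h's binary digits around its lowest bit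
def pal (h : Nat) : Nat := palLoop h (h / 2)

def next_hack_alt (n : Int) : Int :=
  if n < 1 then 1
  else
    let m := n.toNat          -- n ≥ 1: Python int arithmetic on Nat is exact
    let L := bitLen m
    let k := L / 2
    if L % 2 = 0 then (pal (2 ^ k + 1) : Int)       -- (1 << k) + 1
    else
      let h := m >>> k                               -- n >> k
      let h := if h % 2 = 0 then h + 1
               else if pal h ≤ m then h + 2 else h
      (pal h : Int)

-- ===== PRECONDITION & SPEC =====
-- Pre_ excludes n < 0: there A's scan reaches 0, whose bin string has no '1',
-- and sum_of_digits["1"] raises KeyError.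
def Pre_next_hack (n : Int) : Prop := 0 ≤ n
instance (n : Int) : Decidable (Pre_next_hack n) := by unfold Pre_next_hack; infer_instance
def pvWitness_next_hack : Int := 5

def Spec_next_hack (n : Int) (out : Int) : Prop := out = next_hack_alt n
instance (n : Int) (out : Int) : Decidable (Spec_next_hack n out) := by unfold Spec_next_hack; infer_instance

-- ===== CLAIM (what is proved, stated in full; the proofs are below) =====
def Claim_equal_next_hack : Prop := ∀ (n : Int), Dom_next_hack n → Pre_next_hack n → Spec_next_hack n (next_hack n)

-- ===== LEMMAS AND PROOFS =====

-- binary digits of a Nat, LSB first (proof-side machinery)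
def bitsL (m : Nat) : List Bool :=
  if h : m = 0 then []
  else decide (m % 2 = 1) :: bitsL (m / 2)
decreasing_by exact Nat.div_lt_self (Nat.pos_of_ne_zero h) one_lt_two

-- value of an MSB-first digit list pushed onto accumulator v
def pushB (v : Nat) (l : List Bool) : Nat := l.foldl (fun v b => 2 * v + cond b 1 0) v
def ofB (l : List Bool) : Nat := pushB 0 l

-- the hack predicate: binary palindrome with an odd number of ones
def IsHack (m : Nat) : Prop := bitsL m = (bitsL m).reverse ∧ (bitsL m).count true % 2 = 1

-- r is the least hack number strictly above m
def GoodAfter (m r : Nat) : Prop := m < r ∧ IsHack r ∧ ∀ x : Nat, m < x → x < r → ¬ IsHack x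

-- unfolding lemmas
theorem bitsL_zero : bitsL 0 = [] := by rw [bitsL]; simp
theorem bitsL_pos {m : Nat} (h : m ≠ 0) : bitsL m = decide (m % 2 = 1) :: bitsL (m / 2) := by
  rw [bitsL]; simp [h]
theorem pyBinNat_zero : pyBinNat 0 = [] := by rw [pyBinNat]; simp
theorem pyBinNat_pos {m : Nat} (h : m ≠ 0) :
    pyBinNat m = pyBinNat (m / 2) ++ [if m % 2 = 1 then '1' else '0'] := by
  rw [pyBinNat]; simp [h]
theorem bitLen_pos {m : Nat} (h : m ≠ 0) : bitLen m = bitLen (m / 2) + 1 := by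
  rw [bitLen]; simp [h]
theorem palLoop_zero (v : Nat) : palLoop v 0 = v := by rw [palLoop]; simp
theorem palLoop_pos (v : Nat) {t : Nat} (h : t ≠ 0) :
    palLoop v t = palLoop (2 * v + t % 2) (t / 2) := by rw [palLoop]; simp [h]

theorem pyBinNat_eq_map (m : Nat) :
    pyBinNat m = ((bitsL m).reverse).map (fun b => cond b '1' '0') := by
  induction m using Nat.strong_induction_on with
  | _ m ih =>
    by_cases h : m = 0
    · subst h; simp [pyBinNat_zero, bitsL_zero]
    · rw [pyBinNat_pos h, bitsL_pos h,
        ih (m / 2) (Nat.div_lt_self (Nat.pos_of_ne_zero h) one_lt_two)]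
      simp only [List.reverse_cons, List.map_append, List.map_cons, List.map_nil]
      rcases Nat.mod_two_eq_zero_or_one m with h2 | h2 <;> simp [h2]

theorem bitLen_eq (m : Nat) : bitLen m = (bitsL m).length := by
  induction m using Nat.strong_induction_on with
  | _ m ih =>
    by_cases h : m = 0
    · subst h; rw [bitLen]; simp [bitsL_zero]
    · rw [bitLen_pos h, bitsL_pos h,
        ih (m / 2) (Nat.div_lt_self (Nat.pos_of_ne_zero h) one_lt_two)]
      simp

-- digit-list bounds
theorem lt_two_pow_len (m : Nat) : m < 2 ^ (bitsL m).length := by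
  induction m using Nat.strong_induction_on with
  | _ m ih =>
    by_cases h : m = 0
    · subst h; simp [bitsL_zero]
    · rw [bitsL_pos h]
      have := ih (m / 2) (Nat.div_lt_self (Nat.pos_of_ne_zero h) one_lt_two)
      simp only [List.length_cons, pow_succ]
      omega
theorem len_pos {m : Nat} (h : m ≠ 0) : (bitsL m).length ≠ 0 := by
  rw [bitsL_pos h]; simp

theorem two_pow_len_le {m : Nat} (h : m ≠ 0) : 2 ^ ((bitsL m).length - 1) ≤ m := by
  induction m using Nat.strong_induction_on with
  | _ m ih =>
    rw [bitsL_pos h]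
    by_cases h2 : m / 2 = 0
    · have : m = 1 := by omega
      subst this; simp [bitsL_zero]
    · have := ih (m / 2) (Nat.div_lt_self (Nat.pos_of_ne_zero h) one_lt_two) h2
      have hl := len_pos h2
      simp only [List.length_cons, Nat.add_sub_cancel]
      calc 2 ^ (bitsL (m / 2)).length = 2 ^ ((bitsL (m / 2)).length - 1) * 2 := by
            rw [← pow_succ]; congr 1; omega
        _ ≤ (m / 2) * 2 := by omega
        _ ≤ m := by omega
theorem len_eq_of_bounds {m k : Nat} (h1 : 2 ^ k ≤ m) (h2 : m < 2 ^ (k + 1)) :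
    (bitsL m).length = k + 1 := by
  have hm : m ≠ 0 := by have := Nat.one_le_two_pow (n := k); omega
  have hlt := lt_two_pow_len m
  have hle := two_pow_len_le hm
  have hp := len_pos hm
  by_contra hne
  rcases Nat.lt_or_ge (bitsL m).length (k + 1) with hc | hc
  · have : 2 ^ (bitsL m).length ≤ 2 ^ k := Nat.pow_le_pow_right (by norm_num) (by omega)
    omega
  · have : 2 ^ (k + 1) ≤ 2 ^ ((bitsL m).length - 1) :=
      Nat.pow_le_pow_right (by norm_num) (by omega)
    omega

-- pushB / ofB facts
theorem pushB_cons (v : Nat) (b : Bool) (l : List Bool) :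
    pushB v (b :: l) = pushB (2 * v + cond b 1 0) l := by
  simp [pushB, List.foldl]

theorem pushB_eq (v : Nat) (l : List Bool) : pushB v l = v * 2 ^ l.length + ofB l := by
  induction l generalizing v with
  | nil => simp [pushB, ofB]
  | cons b l ih =>
    have hr : ofB (b :: l) = (2 * 0 + cond b 1 0) * 2 ^ l.length + ofB l := by
      rw [ofB, pushB_cons, ih]
    rw [pushB_cons, ih, hr]
    simp only [List.length_cons, pow_succ]
    ring
theorem ofB_append (l1 l2 : List Bool) :
    ofB (l1 ++ l2) = ofB l1 * 2 ^ l2.length + ofB l2 := by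
  rw [ofB, pushB, List.foldl_append, ← pushB, ← pushB, ← ofB, pushB_eq]
theorem ofB_lt (l : List Bool) : ofB l < 2 ^ l.length := by
  induction l with
  | nil => simp [ofB, pushB]
  | cons b l ih =>
    rw [ofB, pushB_cons, pushB_eq]
    simp only [List.length_cons, pow_succ]
    rcases b with _ | _ <;> simp_all <;> omega
theorem ofB_msb (m : Nat) : ofB ((bitsL m).reverse) = m := by
  induction m using Nat.strong_induction_on with
  | _ m ih =>
    by_cases h : m = 0
    · subst h; simp [bitsL_zero, ofB, pushB]
    · rw [bitsL_pos h]
      simp only [List.reverse_cons]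
      rw [ofB_append, ih (m / 2) (Nat.div_lt_self (Nat.pos_of_ne_zero h) one_lt_two)]
      have : ofB [decide (m % 2 = 1)] = m % 2 := by
        rcases Nat.mod_two_eq_zero_or_one m with h2 | h2 <;> simp [h2, ofB, pushB]
      simp only [List.length_cons, List.length_nil, this, pow_succ, pow_zero]
      omega
theorem ofB_pos (D : List Bool) (h : D.head? = some true) : ofB D ≠ 0 := by
  rcases D with _ | ⟨b, E⟩
  · simp at h
  · simp at h; subst h
    rw [ofB, pushB_cons, pushB_eq]
    simp

theorem bitsL_ofB (D : List Bool) (h : D.head? = some true) :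
    (bitsL (ofB D)).reverse = D := by
  induction D using List.reverseRecOn with
  | nil => simp at h
  | append_singleton E b ih =>
    rcases E with _ | ⟨c, E'⟩
    · simp at h; subst h
      have h1 : ofB ([] ++ [true]) = 1 := by simp [ofB, pushB]
      rw [h1, bitsL_pos (by norm_num)]
      simp [bitsL_zero]
    · have hE : (c :: E').head? = some true := by simpa using h
      have hv : ofB (c :: E') ≠ 0 := ofB_pos _ hE
      rw [ofB_append]
      have hb : ofB [b] = cond b 1 0 := by rcases b with _ | _ <;> simp [ofB, pushB]
      simp only [List.length_cons, List.length_nil, pow_succ, pow_zero, hb]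
      set v := ofB (c :: E') with hvdef
      have hne : v * (1 * 2) + cond b 1 0 ≠ 0 := by
        rcases b with _ | _ <;> simp <;> omega
      rw [bitsL_pos hne]
      have hmod : decide ((v * (1 * 2) + cond b 1 0) % 2 = 1) = b := by
        rcases b with _ | _ <;> simp <;> omega
      have hdiv : (v * (1 * 2) + cond b 1 0) / 2 = v := by
        rcases b with _ | _ <;> simp <;> omega
      rw [hmod, hdiv]
      simp [ih hE]
theorem head_msb {m : Nat} (h : m ≠ 0) : ((bitsL m).reverse).head? = some true := by
  induction m using Nat.strong_induction_on with
  | _ m ih =>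
    rw [bitsL_pos h]
    by_cases h2 : m / 2 = 0
    · have h1 : m = 1 := by omega
      subst h1; simp [bitsL_zero]
    · have := ih (m / 2) (Nat.div_lt_self (Nat.pos_of_ne_zero h) one_lt_two) h2
      simp only [List.reverse_cons]
      rw [List.head?_append]
      simp [this]

-- pal facts
theorem palLoop_eq (v t : Nat) : palLoop v t = pushB v (bitsL t) := by
  induction t using Nat.strong_induction_on generalizing v with
  | _ t ih =>
    by_cases h : t = 0
    · subst h; rw [palLoop_zero, bitsL_zero]; simp [pushB]
    · rw [palLoop_pos v h, bitsL_pos h, pushB_cons,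
        ih (t / 2) (Nat.div_lt_self (Nat.pos_of_ne_zero h) one_lt_two)]
      congr 1
      rcases Nat.mod_two_eq_zero_or_one t with h2 | h2 <;> simp [h2]
theorem pal_eq (h : Nat) :
    pal h = h * 2 ^ (bitsL (h / 2)).length + ofB (bitsL (h / 2)) := by
  rw [pal, palLoop_eq, pushB_eq]
theorem msb_pal {h : Nat} (hh : h ≠ 0) :
    (bitsL (pal h)).reverse = (bitsL h).reverse ++ bitsL (h / 2) := by
  have hofb : ofB ((bitsL h).reverse ++ bitsL (h / 2)) = pal h := by
    rw [ofB_append, ofB_msb, pal_eq]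
  rw [← hofb]
  apply bitsL_ofB
  rw [List.head?_append]
  simp [head_msb hh]
theorem len_half {h : Nat} (hh : h ≠ 0) :
    (bitsL (h / 2)).length = (bitsL h).length - 1 := by
  rw [bitsL_pos hh]; simp
theorem pal_ge {h : Nat} (hh : h ≠ 0) : h * 2 ^ ((bitsL h).length - 1) ≤ pal h := by
  rw [pal_eq, len_half hh]; omega
theorem pal_lt {h : Nat} (hh : h ≠ 0) : pal h < 2 ^ (2 * (bitsL h).length - 1) := by
  rw [pal_eq, len_half hh]
  have h1 := lt_two_pow_len h
  have h2 := ofB_lt (bitsL (h / 2))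
  rw [len_half hh] at h2
  have hp := len_pos hh
  set L := (bitsL h).length with hL
  have : 2 * L - 1 = L + (L - 1) := by omega
  rw [this, pow_add]
  have hexp : (h + 1) * 2 ^ (L - 1) = h * 2 ^ (L - 1) + 2 ^ (L - 1) := by ring
  calc h * 2 ^ (L - 1) + ofB (bitsL (h / 2)) < (h + 1) * 2 ^ (L - 1) := by omega
    _ ≤ 2 ^ L * 2 ^ (L - 1) := Nat.mul_le_mul_right _ (by omega)
theorem len_mono {h1 h2 : Nat} (hle : h1 ≤ h2) : (bitsL h1).length ≤ (bitsL h2).length := by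
  by_cases hz : h1 = 0
  · subst hz; simp [bitsL_zero]
  by_contra hc
  have hz2 : h2 ≠ 0 := by omega
  have b1 := two_pow_len_le hz
  have b2 := lt_two_pow_len h2
  have : 2 ^ (bitsL h2).length ≤ 2 ^ ((bitsL h1).length - 1) :=
    Nat.pow_le_pow_right (by norm_num) (by have := len_pos hz; omega)
  omega

theorem pal_strict {h1 h2 : Nat} (h0 : 1 ≤ h1) (hlt : h1 < h2) : pal h1 < pal h2 := by
  have hz1 : h1 ≠ 0 := by omega
  have e12 : (bitsL (h1 / 2)).length ≤ (bitsL (h2 / 2)).length :=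
    len_mono (Nat.div_le_div_right (le_of_lt hlt))
  have hub := ofB_lt (bitsL (h1 / 2))
  have hpow := Nat.pow_le_pow_right (show 1 ≤ 2 by norm_num) e12
  have hexp : (h1 + 1) * 2 ^ (bitsL (h1 / 2)).length
      = h1 * 2 ^ (bitsL (h1 / 2)).length + 2 ^ (bitsL (h1 / 2)).length := by ring
  calc pal h1 = h1 * 2 ^ (bitsL (h1 / 2)).length + ofB (bitsL (h1 / 2)) := pal_eq h1
    _ < (h1 + 1) * 2 ^ (bitsL (h1 / 2)).length := by omega
    _ ≤ h2 * 2 ^ (bitsL (h1 / 2)).length := Nat.mul_le_mul_right _ (by omega)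
    _ ≤ h2 * 2 ^ (bitsL (h2 / 2)).length := Nat.mul_le_mul_left _ hpow
    _ ≤ pal h2 := by rw [pal_eq]; omega

theorem pal_mono {h1 h2 : Nat} (h0 : 1 ≤ h1) (hle : h1 ≤ h2) : pal h1 ≤ pal h2 := by
  rcases Nat.eq_or_lt_of_le hle with rfl | hlt
  · exact le_refl _
  · exact le_of_lt (pal_strict h0 hlt)

-- characterization: hack numbers are exactly pal of odd halves
theorem isHack_pal {h : Nat} (hodd : h % 2 = 1) : IsHack (pal h) := by
  have hz : h ≠ 0 := by omega
  have hb : bitsL h = true :: bitsL (h / 2) := by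
    rw [bitsL_pos hz]; simp [hodd]
  have hD := msb_pal hz
  constructor
  · have hsym : ((bitsL (pal h)).reverse).reverse = (bitsL (pal h)).reverse := by
      rw [hD, hb]; simp
    have := List.reverse_inj.mp hsym
    simpa using this.symm
  · have : (bitsL (pal h)).count true
        = (bitsL h).count true + (bitsL (h / 2)).count true := by
      rw [← List.count_reverse, hD]
      simp [List.count_append]
    rw [this, hb]
    simp
    omega
theorem pal_decomp (D : List Bool) (hpal : D.reverse = D)
    (hcnt : D.count true % 2 = 1) (hhead : D.head? = some true) :
    ∃ h : Nat, h % 2 = 1 ∧ pal h = ofB D := by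
  have hne : D ≠ [] := by rintro rfl; simp at hhead
  have hLpos : D.length ≠ 0 := by simpa using hne
  have take_rev : ∀ j, (D.take j).reverse = D.drop (D.length - j) := by
    intro j; rw [List.reverse_take, hpal]
  have hsplit : ∀ j, D.count true = (D.take j).count true + (D.drop j).count true := by
    intro j; rw [← List.count_append, List.take_append_drop]
  -- the length is odd
  have hLodd : D.length % 2 = 1 := by
    by_contra hc
    have h1 := hsplit (D.length / 2)
    have hdrop : D.drop (D.length / 2) = (D.take (D.length / 2)).reverse := by
      rw [take_rev]; congr 1; omega
    rw [hdrop, List.count_reverse] at h1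
    omega
  obtain ⟨k, hkL⟩ : ∃ k, D.length = 2 * k + 1 := ⟨D.length / 2, by omega⟩
  have hklt : k < D.length := by omega
  -- the middle digit is true
  have hmid : D[k] = true := by
    have h1 := hsplit k
    have h2 : D.drop k = D[k] :: D.drop (k + 1) := List.drop_eq_getElem_cons hklt
    have h3 : D.drop (k + 1) = (D.take k).reverse := by
      rw [take_rev]; congr 1; omega
    rw [h2, h3] at h1
    by_cases hb : D[k] = true
    · exact hb
    · rw [Bool.not_eq_true] at hb
      rw [hb] at h1
      simp only [List.count_cons, List.count_reverse] at h1
      simp at h1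
      omega
  -- the upper half, read as a number
  have htakehead : (D.take (k + 1)).head? = some true := by
    rcases D with _ | ⟨d, D'⟩
    · simp at hhead
    · simpa using hhead
  have hmsbh : (bitsL (ofB (D.take (k + 1)))).reverse = D.take (k + 1) :=
    bitsL_ofB _ htakehead
  have hz : ofB (D.take (k + 1)) ≠ 0 := ofB_pos _ htakehead
  have hlen_take : (D.take (k + 1)).length = k + 1 := by
    rw [List.length_take]; omega
  have hodd : ofB (D.take (k + 1)) % 2 = 1 := by
    have h1 : (bitsL (ofB (D.take (k + 1)))).head? =
        some (decide (ofB (D.take (k + 1)) % 2 = 1)) := by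
      rw [bitsL_pos hz]; rfl
    have h3 : (bitsL (ofB (D.take (k + 1)))).head? = some true := by
      rw [← List.getLast?_reverse, hmsbh]
      rw [List.getLast?_eq_getElem?, hlen_take]
      simp only [Nat.add_sub_cancel]
      rw [List.getElem?_take_of_lt (by omega)]
      simp [List.getElem?_eq_getElem hklt, hmid]
    rw [h3] at h1
    have := Option.some.inj h1
    simpa using this.symm
  have hhalf : bitsL (ofB (D.take (k + 1)) / 2) = (D.take k).reverse := by
    have h1 : bitsL (ofB (D.take (k + 1))) = (D.take (k + 1)).reverse := by
      have := congrArg List.reverse hmsbh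
      rwa [List.reverse_reverse] at this
    have h2 : bitsL (ofB (D.take (k + 1)) / 2) = (bitsL (ofB (D.take (k + 1)))).tail := by
      rw [bitsL_pos hz]; rfl
    rw [h2, h1, List.tail_reverse]
    congr 1
    rw [List.dropLast_eq_take, hlen_take]
    rw [List.take_take]
    congr 1
    omega
  refine ⟨ofB (D.take (k + 1)), hodd, ?_⟩
  have hofb : pal (ofB (D.take (k + 1))) = ofB (D.take (k + 1) ++ (D.take k).reverse) := by
    rw [ofB_append, ← hmsbh, ofB_msb, pal_eq, hhalf]
  have hfin : D.take (k + 1) ++ (D.take k).reverse = D := by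
    rw [take_rev]
    have h4 : D.length - k = k + 1 := by omega
    rw [h4, List.take_append_drop]
  rw [hofb, hfin]

theorem hack_is_pal {m : Nat} (hm : m ≠ 0) (hk : IsHack m) :
    ∃ h : Nat, h % 2 = 1 ∧ pal h = m := by
  obtain ⟨hpal, hcnt⟩ := hk
  have h1 : ((bitsL m).reverse).reverse = (bitsL m).reverse := by
    rw [List.reverse_reverse]; exact hpal
  have h2 : ((bitsL m).reverse).count true % 2 = 1 := by
    rw [List.count_reverse]; exact hcnt
  obtain ⟨h, hodd, hpalh⟩ := pal_decomp ((bitsL m).reverse) h1 h2 (head_msb hm)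
  exact ⟨h, hodd, by rw [hpalh, ofB_msb]⟩

theorem bitsL_ones (s : Nat) : bitsL (2 ^ s - 1) = List.replicate s true := by
  induction s with
  | zero => simp [bitsL_zero]
  | succ s ih =>
    have h2 : (2 : Nat) ^ (s + 1) = 2 * 2 ^ s := by ring
    have hp : (1 : Nat) ≤ 2 ^ s := Nat.one_le_two_pow
    have hz : 2 ^ (s + 1) - 1 ≠ 0 := by omega
    rw [bitsL_pos hz]
    have hmod : (2 ^ (s + 1) - 1) % 2 = 1 := by omega
    have hdiv : (2 ^ (s + 1) - 1) / 2 = 2 ^ s - 1 := by omega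
    rw [hmod, hdiv, ih]
    simp [List.replicate_succ]

theorem isHack_ones {s : Nat} (hs : s % 2 = 1) : IsHack (2 ^ s - 1) := by
  rw [IsHack, bitsL_ones]
  constructor
  · simp
  · simp [hs]

-- B returns the least hack above n
theorem count_map_one (l : List Bool) :
    (l.map (fun b => cond b '1' '0')).count '1' = l.count true := by
  have := List.count_map_of_injective l (fun b : Bool => cond b '1' '0')
    (by decide) true
  simpa using this

theorem checkA_iff {i : Int} (hi : 1 ≤ i) : checkA i = true ↔ IsHack i.toNat := by
  have hm : i.toNat ≠ 0 := by omega
  have hbt : pyBinTail i = pyBinNat i.toNat := by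
    unfold pyBinTail
    have h1 : ¬ i < 0 := by omega
    have h2 : ¬ i = 0 := by omega
    simp [h1, h2]
  have hstep : (fun (d : PySem.Dict Char Int) c =>
        if d.contains c = false then d.insert c (1 : Int)
        else d.insert c (d.getD c 0 + 1))
      = fun (d : PySem.Dict Char Int) c => d.insert c (d.getD c 0 + 1) := by
    funext d c
    by_cases hc : d.contains c = false
    · rw [if_pos hc]
      congr 1
      simp [PySem.Dict.getD_of_not_contains, hc]
    · rw [if_neg hc]
  unfold checkA
  rw [hstep]
  simp only [PySem.List.slice?_none_none_neg_one, Option.getD_some,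
    PySem.Dict.getD_foldl_insert_add_one, PySem.Dict.getD_empty, hbt,
    pyBinNat_eq_map, zero_add]
  rw [Bool.and_eq_true, beq_iff_eq, beq_iff_eq, count_map_one]
  constructor
  · rintro ⟨hp, hc⟩
    constructor
    · have : ((bitsL i.toNat).reverse).reverse = (bitsL i.toNat).reverse := by
        apply List.map_injective_iff.mpr (show Function.Injective
          (fun b : Bool => cond b '1' '0') by decide)
        rw [List.map_reverse]
        exact hp.symm
      simpa using this
    · rw [← List.count_reverse]
      omega
  · rintro ⟨hp, hc⟩
    constructor
    · rw [← List.map_reverse]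
      congr 1
      simpa using (congrArg List.reverse hp.symm).symm
    · rw [List.count_reverse]
      omega

theorem aloopA_exact : ∀ (fuel : Nat) (m r : Int), m < r → r ≤ m + fuel →
    checkA r = true → (∀ x : Int, m < x → x < r → checkA x = false) →
    aloopA fuel m = r := by
  intro fuel
  induction fuel with
  | zero => intro m r h1 h2 _ _; omega
  | succ fuel ih =>
    intro m r h1 h2 hc hn
    by_cases hcm : checkA (m + 1) = true
    · have : r = m + 1 := by
        by_contra hne
        have hlt : m + 1 < r := by omega
        have := hn (m + 1) (by omega) hlt
        rw [hcm] at this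
        simp at this
      subst this
      simp [aloopA, hcm]
    · have hlt : m + 1 < r := by
        by_cases he : r = m + 1
        · rw [he] at hc; exact absurd hc hcm
        · omega
      have := ih (m + 1) r hlt (by omega) hc (fun x hx1 hx2 => hn x (by omega) hx2)
      simp [aloopA, hcm, this]

theorem len_le {h k : Nat} (h1 : h ≠ 0) (h2 : h < 2 ^ k) : (bitsL h).length ≤ k := by
  have := two_pow_len_le h1
  by_contra hc
  have : 2 ^ k ≤ 2 ^ ((bitsL h).length - 1) :=
    Nat.pow_le_pow_right (by norm_num) (by have := len_pos h1; omega)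
  omega

-- pal of a short half is small
theorem pal_small {h j : Nat} (h1 : h ≠ 0) (h2 : (bitsL h).length ≤ j) :
    pal h < 2 ^ (2 * j - 1) := by
  have := pal_lt h1
  have hp := len_pos h1
  have : 2 ^ (2 * (bitsL h).length - 1) ≤ 2 ^ (2 * j - 1) :=
    Nat.pow_le_pow_right (by norm_num) (by omega)
  omega

-- pal of a (k+1)-bit half is below (h+1)·2^k
theorem pal_ub {h k : Nat} (h1 : h ≠ 0) (h2 : (bitsL h).length = k + 1) :
    pal h < (h + 1) * 2 ^ k := by
  have he : (bitsL (h / 2)).length = k := by rw [len_half h1, h2]; omega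
  have := ofB_lt (bitsL (h / 2))
  rw [he] at this
  have hq := pal_eq h
  rw [he] at hq
  have : (h + 1) * 2 ^ k = h * 2 ^ k + 2 ^ k := by ring
  omega

-- any odd half strictly below h0 mirrors to a value ≤ m
theorem below_h0 {m k h0 h : Nat} (hlow : 2 ^ k ≤ h0) (hhi : h0 < 2 ^ (k + 1))
    (hup : h0 * 2 ^ k ≤ m) (h1 : h ≠ 0) (hlt : h < h0) : pal h ≤ m := by
  have hm2k : 2 ^ (2 * k) ≤ m := by
    have : 2 ^ k * 2 ^ k ≤ h0 * 2 ^ k := Nat.mul_le_mul_right _ hlow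
    have hpw : 2 ^ k * 2 ^ k = 2 ^ (2 * k) := by rw [← pow_add]; congr 1; omega
    omega
  by_cases hlen : (bitsL h).length ≤ k
  · have hk1 : 1 ≤ k := by have := len_pos h1; omega
    have := pal_small h1 hlen
    have hstep : 2 ^ (2 * k - 1) ≤ 2 ^ (2 * k) := Nat.pow_le_pow_right (by norm_num) (by omega)
    omega
  · have hub : (bitsL h).length ≤ k + 1 := by
      apply len_le h1
      omega
    have hlen' : (bitsL h).length = k + 1 := by omega
    have := pal_ub h1 hlen'
    have : (h + 1) * 2 ^ k ≤ h0 * 2 ^ k := Nat.mul_le_mul_right _ (by omega)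
    omega

theorem hack_one : IsHack 1 := by
  have h1 : bitsL 1 = [true] := by
    rw [bitsL_pos (by norm_num)]
    norm_num [bitsL_zero]
  rw [IsHack, h1]
  exact ⟨rfl, rfl⟩

-- minimal odd half gives the least hack above m
theorem pal_min_good {m hst : Nat} (hm : 1 ≤ m) (hodd : hst % 2 = 1)
    (hgt : m < pal hst) (hmin : ∀ h', h' % 2 = 1 → m < pal h' → hst ≤ h') :
    GoodAfter m (pal hst) := by
  refine ⟨hgt, isHack_pal hodd, ?_⟩
  intro x hx1 hx2 hxh
  have hxz : x ≠ 0 := by omega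
  obtain ⟨h', hodd', rfl⟩ := hack_is_pal hxz hxh
  have h1 := hmin h' hodd' hx1
  have h2 := pal_mono (by omega : 1 ≤ hst) h1
  omega

theorem alt_good (n : Int) (hn : 0 ≤ n) :
    ∃ r : Nat, next_hack_alt n = (r : Int) ∧ GoodAfter n.toNat r := by
  by_cases hsmall : n < 1
  · refine ⟨1, by simp [next_hack_alt, hsmall], ?_⟩
    have h0 : n.toNat = 0 := by omega
    rw [h0]
    exact ⟨by omega, hack_one, by intro x h1 h2 _; omega⟩
  · have hm : 1 ≤ n.toNat := by omega
    have hmz : n.toNat ≠ 0 := by omega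
    obtain ⟨l, hl⟩ : ∃ l, (bitsL n.toNat).length = l := ⟨_, rfl⟩
    have hbl : bitLen n.toNat = l := by rw [bitLen_eq, hl]
    have hlpos : l ≠ 0 := by rw [← hl]; exact len_pos hmz
    have hmlt : n.toNat < 2 ^ l := by rw [← hl]; exact lt_two_pow_len n.toNat
    have hmge : 2 ^ (l - 1) ≤ n.toNat := by rw [← hl]; exact two_pow_len_le hmz
    by_cases hpar : l % 2 = 0
    · -- even bit length: the answer is pal (2^(l/2) + 1)
      obtain ⟨k, hk⟩ : ∃ k, l = 2 * k := ⟨l / 2, by omega⟩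
      have hk1 : 1 ≤ k := by omega
      have heq : next_hack_alt n = (pal (2 ^ k + 1) : Int) := by
        have hdiv : l / 2 = k := by omega
        simp only [next_hack_alt, hbl, hdiv]
        rw [if_neg hsmall, if_pos (show l % 2 = 0 from hpar)]
      have hpow : (2 : Nat) ^ k = 2 * 2 ^ (k - 1) := by
        rw [← pow_succ']; congr 1; omega
      have hodd : (2 ^ k + 1) % 2 = 1 := by omega
      have hhb : 2 ^ k ≤ 2 ^ k + 1 ∧ 2 ^ k + 1 < 2 ^ (k + 1) := by
        have h1 : (2 : Nat) ^ (k + 1) = 2 * 2 ^ k := by rw [← pow_succ']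
        have h2 : (1 : Nat) ≤ 2 ^ (k - 1) := Nat.one_le_two_pow
        omega
      have hlen : (bitsL (2 ^ k + 1)).length = k + 1 := len_eq_of_bounds hhb.1 hhb.2
      have hgt : n.toNat < pal (2 ^ k + 1) := by
        have h1 := pal_ge (show 2 ^ k + 1 ≠ 0 by omega)
        rw [hlen] at h1
        simp only [Nat.add_sub_cancel] at h1
        have hpw2k : (2 : Nat) ^ (2 * k) = 2 ^ k * 2 ^ k := by
          rw [← pow_add]; congr 1; omega
        have h2 : (2 ^ k + 1) * 2 ^ k = 2 ^ (2 * k) + 2 ^ k := by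
          rw [hpw2k]; ring
        have h3 : n.toNat < 2 ^ (2 * k) := by rw [← hk]; exact hmlt
        omega
      refine ⟨pal (2 ^ k + 1), heq, pal_min_good hm hodd hgt ?_⟩
      intro h' hodd' hgt'
      by_contra hc
      have hne : h' ≠ 2 ^ k := by
        intro he; rw [he] at hodd'; omega
      have hlt' : h' < 2 ^ k := by omega
      have hz' : h' ≠ 0 := by omega
      have := pal_small hz' (len_le hz' hlt')
      have hle : 2 ^ (2 * k - 1) ≤ n.toNat := by
        have : l - 1 = 2 * k - 1 := by omega
        rw [← this]; exact hmge
      omega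
    · -- odd bit length: l = 2k+1, the half comes from the top k+1 bits
      obtain ⟨k, hk⟩ : ∃ k, l = 2 * k + 1 := ⟨l / 2, by omega⟩
      have hkl : l / 2 = k := by omega
      have hp : (0 : Nat) < 2 ^ k := Nat.pow_pos (by norm_num)
      have hdm := Nat.div_add_mod n.toNat (2 ^ k)
      have hmod : n.toNat % 2 ^ k < 2 ^ k := Nat.mod_lt _ hp
      have hsr : n.toNat >>> k = n.toNat / 2 ^ k := Nat.shiftRight_eq_div_pow _ _
      obtain ⟨h0, hh0⟩ : ∃ h0, n.toNat / 2 ^ k = h0 := ⟨_, rfl⟩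
      rw [hh0] at hdm
      have hcomm : h0 * 2 ^ k = 2 ^ k * h0 := by ring
      have hpw1 : (2 : Nat) ^ (2 * k) = 2 ^ k * 2 ^ k := by rw [← pow_add]; congr 1; omega
      have hpw2 : (2 : Nat) ^ (2 * k + 1) = 2 * (2 ^ k * 2 ^ k) := by
        rw [← pow_add]; rw [← pow_succ']; congr 1; omega
      have hmge' : 2 ^ k * 2 ^ k ≤ n.toNat := by
        have : l - 1 = 2 * k := by omega
        rw [this, hpw1] at hmge; exact hmge
      have hmlt' : n.toNat < 2 * (2 ^ k * 2 ^ k) := by rw [hk, hpw2] at hmlt; exact hmlt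
      have hlow : 2 ^ k ≤ h0 := by
        rw [← hh0]
        exact (Nat.le_div_iff_mul_le hp).mpr hmge'
      have hhi : h0 < 2 ^ (k + 1) := by
        rw [← hh0]
        apply (Nat.div_lt_iff_lt_mul hp).mpr
        have : (2 : Nat) ^ (k + 1) * 2 ^ k = 2 * (2 ^ k * 2 ^ k) := by
          rw [pow_succ']; ring
        omega
      have hup : h0 * 2 ^ k ≤ n.toNat := by omega
      have hupp : n.toNat < (h0 + 1) * 2 ^ k := by
        have hb : (h0 + 1) * 2 ^ k = 2 ^ k * h0 + 2 ^ k := by ring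
        omega
      have hh0z : h0 ≠ 0 := by omega
      -- the three branches of B
      by_cases hev : h0 % 2 = 0
      · -- h0 even: half is h0 + 1
        have heq : next_hack_alt n = (pal (h0 + 1) : Int) := by
          simp only [next_hack_alt, hbl, hkl, hsr, hh0]
          rw [if_neg hsmall, if_neg (show ¬ l % 2 = 0 from hpar), if_pos hev]
        have hb1 : 2 ^ k ≤ h0 + 1 := by omega
        have hb2 : h0 + 1 < 2 ^ (k + 1) := by
          have : (2 : Nat) ^ (k + 1) = 2 * 2 ^ k := by rw [← pow_succ']
          omega
        have hlen : (bitsL (h0 + 1)).length = k + 1 := len_eq_of_bounds hb1 hb2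
        have hgt : n.toNat < pal (h0 + 1) := by
          have h1 := pal_ge (show h0 + 1 ≠ 0 by omega)
          rw [hlen] at h1
          simp only [Nat.add_sub_cancel] at h1
          omega
        refine ⟨pal (h0 + 1), heq, pal_min_good hm (by omega) hgt ?_⟩
        intro h' hodd' hgt'
        by_contra hc
        have hz' : h' ≠ 0 := by omega
        have hlt' : h' < h0 := by omega
        have := below_h0 hlow hhi hup hz' hlt'
        omega
      · by_cases hple : pal h0 ≤ n.toNat
        · -- h0 odd but its mirror is too small: half is h0 + 2
          have heq : next_hack_alt n = (pal (h0 + 2) : Int) := by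
            simp only [next_hack_alt, hbl, hkl, hsr, hh0]
            rw [if_neg hsmall, if_neg (show ¬ l % 2 = 0 from hpar), if_neg hev,
              if_pos hple]
          have hgt : n.toNat < pal (h0 + 2) := by
            by_cases htop : h0 + 2 < 2 ^ (k + 1)
            · have hlen : (bitsL (h0 + 2)).length = k + 1 :=
                len_eq_of_bounds (by omega) htop
              have h1 := pal_ge (show h0 + 2 ≠ 0 by omega)
              rw [hlen] at h1
              simp only [Nat.add_sub_cancel] at h1
              have : (h0 + 2) * 2 ^ k = (h0 + 1) * 2 ^ k + 2 ^ k := by ring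
              omega
            · -- h0 = 2^(k+1) - 1: the half grows a bit
              have h2k1 : (2 : Nat) ^ (k + 1) = 2 * 2 ^ k := by rw [← pow_succ']
              have htope : h0 + 2 = 2 ^ (k + 1) + 1 := by omega
              have hb1 : 2 ^ (k + 1) ≤ h0 + 2 := by omega
              have hb2 : h0 + 2 < 2 ^ (k + 2) := by
                have : (2 : Nat) ^ (k + 2) = 2 * 2 ^ (k + 1) := by rw [← pow_succ']
                omega
              have hlen : (bitsL (h0 + 2)).length = k + 2 := by
                have := len_eq_of_bounds hb1 hb2
                omega
              have h1 := pal_ge (show h0 + 2 ≠ 0 by omega)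
              rw [hlen] at h1
              have hk2 : k + 2 - 1 = k + 1 := by omega
              rw [hk2] at h1
              have h3 : (h0 + 2) * 2 ^ (k + 1) ≥ 2 ^ (k + 1) * 2 ^ (k + 1) :=
                Nat.mul_le_mul_right _ hb1
              have h4 : (2 : Nat) ^ (k + 1) * 2 ^ (k + 1) = 2 * (2 ^ k * 2 ^ k) * 2 := by
                rw [h2k1]; ring
              omega
          refine ⟨pal (h0 + 2), heq, pal_min_good hm (by omega) hgt ?_⟩
          intro h' hodd' hgt'
          by_contra hc
          have hz' : h' ≠ 0 := by omega
          rcases Nat.lt_or_ge h' h0 with hlt' | hge'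
          · have := below_h0 hlow hhi hup hz' hlt'
            omega
          · have : h' = h0 ∨ h' = h0 + 1 := by omega
            rcases this with rfl | rfl
            · omega
            · omega
        · -- h0 odd and pal h0 already beats n: half is h0
          have heq : next_hack_alt n = (pal h0 : Int) := by
            simp only [next_hack_alt, hbl, hkl, hsr, hh0]
            rw [if_neg hsmall, if_neg (show ¬ l % 2 = 0 from hpar), if_neg hev,
              if_neg hple]
          refine ⟨pal h0, heq, pal_min_good hm (by omega) (by omega) ?_⟩
          intro h' hodd' hgt'
          by_contra hc
          have hz' : h' ≠ 0 := by omega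
          have := below_h0 hlow hhi hup hz' (by omega)
          omega

-- the least hack above m is at most 8*m + 8
theorem good_bound {m r : Nat} (h : GoodAfter m r) : r ≤ 8 * m + 8 := by
  obtain ⟨hmr, hhack, hmin⟩ := h
  obtain ⟨t, ht⟩ : ∃ t, (bitsL m).length = t := ⟨_, rfl⟩
  set s := if t % 2 = 1 then t + 2 else t + 1 with hs
  have hsodd : s % 2 = 1 := by rw [hs]; split_ifs with h1 <;> omega
  have hws : IsHack (2 ^ s - 1) := isHack_ones hsodd
  have hlt : m < 2 ^ t := by rw [← ht]; exact lt_two_pow_len m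
  have hst : t + 1 ≤ s ∧ s ≤ t + 2 := by rw [hs]; split_ifs <;> omega
  have hwgt : m < 2 ^ s - 1 := by
    have h1 : 2 ^ (t + 1) ≤ 2 ^ s := Nat.pow_le_pow_right (by norm_num) hst.1
    have h2 : (2 : Nat) ^ (t + 1) = 2 * 2 ^ t := by ring
    omega
  have hwle : 2 ^ s - 1 ≤ 8 * m + 8 := by
    have h1 : 2 ^ s ≤ 2 ^ (t + 2) := Nat.pow_le_pow_right (by norm_num) hst.2
    by_cases hz : m = 0
    · have ht0 : t = 0 := by subst hz; rw [← ht]; simp [bitsL_zero]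
      have h2 : (2 : Nat) ^ (t + 2) = 4 := by rw [ht0]; norm_num
      omega
    · have h2 : (2 : Nat) ^ (t + 2) = 4 * 2 ^ t := by ring
      have h4 : 2 ^ (t - 1) ≤ m := by rw [← ht]; exact two_pow_len_le hz
      have h5 : 2 ^ t = 2 ^ (t - 1) * 2 := by
        rw [← pow_succ]; congr 1
        have := len_pos hz; omega
      omega
  by_contra hc
  exact hmin (2 ^ s - 1) hwgt (by omega) hws

-- ===== VERDICT (by name: the statement is the Claim_ definition above) =====
theorem next_hack_spec : Claim_equal_next_hack := by
  intro n _ hpre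
  have hn : (0 : Int) ≤ n := hpre
  unfold Spec_next_hack
  obtain ⟨r, hB, hgt, hhack, hmin⟩ := alt_good n hn
  rw [hB]
  unfold next_hack
  apply aloopA_exact
  · omega
  · have hb := good_bound ⟨hgt, hhack, hmin⟩
    omega
  · have hr1 : (1 : Int) ≤ (r : Int) := by omega
    rw [checkA_iff hr1]
    simpa using hhack
  · intro x hx1 hx2
    have hx : (1 : Int) ≤ x := by omega
    by_contra hc
    have hct : checkA x = true := by
      cases hcx : checkA x
      · exact absurd hcx hc
      · rfl
    have := (checkA_iff hx).mp hct
    exact hmin x.toNat (by omega) (by omega) this
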